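-- pv_equiv track=rewrite | github.com/kmanadkat/leetcode-101 | 01 List/Problems/10_left_rotate_n.py | leftRotateByN3
-- ===== SOURCE A (Python) =====
-- from typing import List
--
-- def leftRotateByN3(inputList: List, n: int) -> List:
--     inputLen = len(inputList)
--     moduloN = n % inputLen
--     if (inputLen <= 1 or moduloN == 0):
--         return inputList
--
--     idx = 0
--     while idx < moduloN:
--         inputList.append(inputList.pop(0))
--         idx += 1
--
--     return inputList
-- ===== SOURCE B (Python) =====
-- def leftRotateByN3(inputList, n):
--     inputLen = len(inputList)
--     moduloN = n % inputLen
--     if (inputLen <= 1 or moduloN == 0):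
--         return inputList
--     # three-reversal rotation, in place on the same list object
--     inputList[:moduloN] = inputList[moduloN - 1::-1]
--     inputList[moduloN:] = inputList[:moduloN - 1:-1]
--     inputList[:] = inputList[::-1]
--     return inputList
-- ===== Notes on version B (the rewrite author's own statement) =====
-- stated objective: faster
-- what changed: Replaced the one-element-at-a-time pop(0)/append loop (each pop(0) shifts the whole list) by the in-place three-reversal rotation using reversed slices.
import Mathlib
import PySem

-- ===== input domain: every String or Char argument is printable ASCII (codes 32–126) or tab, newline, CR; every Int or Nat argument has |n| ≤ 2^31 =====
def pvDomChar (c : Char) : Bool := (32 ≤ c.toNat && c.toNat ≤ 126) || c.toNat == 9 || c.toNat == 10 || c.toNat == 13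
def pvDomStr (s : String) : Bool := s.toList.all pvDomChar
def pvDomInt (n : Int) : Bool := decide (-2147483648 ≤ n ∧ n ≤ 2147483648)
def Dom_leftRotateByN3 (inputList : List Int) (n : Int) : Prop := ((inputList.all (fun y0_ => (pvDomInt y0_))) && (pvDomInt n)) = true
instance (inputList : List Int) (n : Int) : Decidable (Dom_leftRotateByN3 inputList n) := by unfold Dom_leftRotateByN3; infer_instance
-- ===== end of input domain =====

-- B replaces A's pop(0)/append loop by the in-place three-reversal rotation (faster: O(n) vs O(n·k)).
-- Both Pythons mutate inputList in place and return the same object; the theorems are about the returned value.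

-- ===== PORT A =====
-- while idx < moduloN: inputList.append(inputList.pop(0)); structural recursion on the remaining count
def pvALoop : Nat → List Int → List Int
  | 0, l => l
  | k + 1, l =>
    match l with
    | [] => []            -- unreachable under Pre_ (pop(0) on [] would raise; guard prevents it)
    | x :: xs => pvALoop k (xs ++ [x])

def leftRotateByN3 (inputList : List Int) (n : Int) : List Int :=
  let inputLen : Int := inputList.length
  let moduloN : Int := PySem.Int.mod n inputLen
  if inputLen ≤ 1 ∨ moduloN = 0 then inputList
  else pvALoop moduloN.toNat inputList

-- ===== PORT B =====
-- three reversed-slice assignments: reverse [0:m), reverse [m:len), reverse the whole list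
def leftRotateByN3_alt (inputList : List Int) (n : Int) : List Int :=
  let inputLen : Int := inputList.length
  let moduloN : Int := PySem.Int.mod n inputLen
  if inputLen ≤ 1 ∨ moduloN = 0 then inputList
  else
    let m := moduloN.toNat
    -- inputList[:m] = inputList[m-1::-1]
    let l1 := (inputList.take m).reverse ++ inputList.drop m
    -- inputList[m:] = inputList[:m-1:-1]
    let l2 := l1.take m ++ (l1.drop m).reverse
    -- inputList[:] = inputList[::-1]
    l2.reverse

-- ===== PRECONDITION & SPEC =====
-- Pre_ excludes the empty list, on which Python A raises ZeroDivisionError at 'n % len(inputList)'.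
def Pre_leftRotateByN3 (inputList : List Int) (n : Int) : Prop := inputList ≠ []
instance (inputList : List Int) (n : Int) : Decidable (Pre_leftRotateByN3 inputList n) := by unfold Pre_leftRotateByN3; infer_instance
def pvWitness_leftRotateByN3 : List Int × Int := ([1, 2, 3, 4, 5], 2)

def Spec_leftRotateByN3 (inputList : List Int) (n : Int) (out : List Int) : Prop := out = leftRotateByN3_alt inputList n
instance (inputList : List Int) (n : Int) (out : List Int) : Decidable (Spec_leftRotateByN3 inputList n out) := by unfold Spec_leftRotateByN3; infer_instance

-- ===== CLAIM (what is proved, stated in full; the proofs are below) =====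
def Claim_equal_leftRotateByN3 : Prop := ∀ (inputList : List Int) (n : Int), Dom_leftRotateByN3 inputList n → Pre_leftRotateByN3 inputList n → Spec_leftRotateByN3 inputList n (leftRotateByN3 inputList n)

-- ===== LEMMAS AND PROOFS =====

-- A's loop rotates: after k steps (k ≤ length) the list is drop k ++ take k
theorem pvALoop_eq_rotate (k : Nat) (l : List Int) (hk : k ≤ l.length) :
    pvALoop k l = l.drop k ++ l.take k := by
  induction k generalizing l with
  | zero => simp [pvALoop]
  | succ k ih =>
    match l with
    | [] => simp at hk
    | x :: xs =>
      have hk' : k ≤ xs.length := by simpa using Nat.le_of_succ_le_succ hk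
      have hx : k ≤ (xs ++ [x]).length := by simp; omega
      rw [pvALoop, ih _ hx]
      rw [List.drop_append_of_le_length hk', List.take_append_of_le_length hk']
      simp

-- ===== VERDICT (by name: the statement is the Claim_ definition above) =====
theorem leftRotateByN3_spec : Claim_equal_leftRotateByN3 := by
  intro l n _ hpre
  unfold Spec_leftRotateByN3 leftRotateByN3 leftRotateByN3_alt
  simp only []
  set len : Int := (l.length : Int) with hlen
  set mo : Int := PySem.Int.mod n len with hmo
  by_cases hg : len ≤ 1 ∨ mo = 0
  · simp [hg]
  · simp only [if_neg hg]
    push Not at hg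
    have hposlen : 0 < len := by
      have h1 : 0 < l.length := List.length_pos_iff.mpr hpre
      rw [hlen]; exact_mod_cast h1
    have h0 : 0 ≤ mo := PySem.Int.mod_nonneg n hposlen
    have hlt : mo < len := PySem.Int.mod_lt n hposlen
    have hmle : mo.toNat ≤ l.length := by
      have : (l.length : Int) = len := hlen.symm
      omega
    rw [pvALoop_eq_rotate _ _ hmle]
    set m := mo.toNat with hm
    have htlen : ((l.take m).reverse).length = m := by
      simp [List.length_take]; omega
    rw [List.take_append_of_le_length (le_of_eq htlen.symm),
        List.drop_append_of_le_length (le_of_eq htlen.symm),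
        List.take_of_length_le (le_of_eq htlen),
        List.drop_of_length_le (le_of_eq htlen)]
    rw [List.nil_append, List.reverse_append, List.reverse_reverse, List.reverse_reverse]
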